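-- pv_equiv track=rewrite | github.com/5zo-s-magician/CodingTest | KHJ/programmers/220126_0_연속된수의합.py | solution
-- ===== SOURCE A (Python) =====
-- def solution(num, total):
--     div,mod = divmod(num,2)
--     base = 0
--
--     if mod != 0:    #홀수
--         base = (total // num)  - (num-1)//2
--     else:
--         base = ((total - num//2) // num) - (num//2-1)
--
--     answer = [base + i for i in range(num)]
--
--     return answer
-- ===== SOURCE B (Python) =====
-- def solution(num, total):
--     # Binary search for the largest first term b whose num-term consecutive
--     # window b, b+1, ..., b+num-1 sums to at most total; then the window itself.
--     if num <= 0: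
--         return []
--     tri = num * (num - 1) // 2          # exact: num*(num-1) is even
--     bound = abs(total) + num * num
--     lo, hi = -bound, bound
--     while lo < hi:
--         mid = (lo + hi + 1) // 2
--         if num * mid + tri <= total:
--             lo = mid
--         else:
--             hi = mid - 1
--     return list(range(lo, lo + num))
-- ===== Notes on version B (the rewrite author's own statement) =====
-- stated objective: alternative
-- what changed: Replaces A's odd/even case split of division formulas with a binary search for the largest first term whose consecutive window sums to at most total, then materialises the window with list(range(lo, lo+num)) (C-level) instead of a Python-level comprehension.
import Mathlib
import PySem

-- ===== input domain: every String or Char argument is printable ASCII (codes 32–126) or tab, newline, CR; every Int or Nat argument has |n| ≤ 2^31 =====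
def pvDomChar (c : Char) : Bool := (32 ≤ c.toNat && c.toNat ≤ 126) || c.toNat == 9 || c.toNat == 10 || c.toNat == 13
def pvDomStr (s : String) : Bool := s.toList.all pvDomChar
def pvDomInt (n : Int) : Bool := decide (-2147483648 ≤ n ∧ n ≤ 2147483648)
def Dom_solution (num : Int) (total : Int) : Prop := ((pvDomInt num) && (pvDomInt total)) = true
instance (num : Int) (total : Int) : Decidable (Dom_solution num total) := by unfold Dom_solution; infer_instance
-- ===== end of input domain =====

-- B replaces A's parity-split division formulas by a binary search for the first term; proved equal for all num ≠ 0 (A raises ZeroDivisionError at num = 0, where B returns []).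


-- ===== PORT A =====
-- divmod(num, 2): divisor is the literal 2 ≠ 0, so the pair is (num//2, num%2) exactly
def solution (num : Int) (total : Int) : List Int :=
  let _div := PySem.Int.floordiv num 2
  let mod := PySem.Int.mod num 2
  let base : Int :=
    if mod ≠ 0 then
      PySem.Int.floordiv total num - PySem.Int.floordiv (num - 1) 2
    else
      PySem.Int.floordiv (total - PySem.Int.floordiv num 2) num - (PySem.Int.floordiv num 2 - 1)
  (PySem.List.pyRange 0 num 1).map (fun i => base + i)

-- ===== PORT B =====
-- the while-loop of Source B: returns the final value of lo
def bsearchB (num total tri lo hi : Int) : Int :=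
  if h : lo < hi then
    let mid := PySem.Int.floordiv (lo + hi + 1) 2
    if num * mid + tri ≤ total then bsearchB num total tri mid hi
    else bsearchB num total tri lo (mid - 1)
  else lo
termination_by (hi - lo).toNat
decreasing_by
  · have hm : PySem.Int.floordiv (lo + hi + 1) 2 = (lo + hi + 1) / 2 :=
      PySem.Int.floordiv_eq_ediv_of_pos (by norm_num)
    simp only [hm]; omega
  · have hm : PySem.Int.floordiv (lo + hi + 1) 2 = (lo + hi + 1) / 2 :=
      PySem.Int.floordiv_eq_ediv_of_pos (by norm_num)
    simp only [hm]; omega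

def solution_alt (num : Int) (total : Int) : List Int :=
  if num ≤ 0 then []
  else
    let tri := PySem.Int.floordiv (num * (num - 1)) 2
    let bound := |total| + num * num
    let lo := bsearchB num total tri (-bound) bound
    PySem.List.pyRange lo (lo + num) 1

-- ===== PRECONDITION & SPEC =====
-- Pre_ excludes only num = 0, where Python's '// num' raises ZeroDivisionError in A.
def Pre_solution (num : Int) (total : Int) : Prop := num ≠ 0
instance (num : Int) (total : Int) : Decidable (Pre_solution num total) := by unfold Pre_solution; infer_instance
def pvWitness_solution : Int × Int := (3, 12)

def Spec_solution (num : Int) (total : Int) (out : List Int) : Prop := out = solution_alt num total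
instance (num : Int) (total : Int) (out : List Int) : Decidable (Spec_solution num total out) := by unfold Spec_solution; infer_instance

-- ===== CLAIM (what is proved, stated in full; the proofs are below) =====
def Claim_equal_solution : Prop := ∀ (num : Int) (total : Int), Dom_solution num total → Pre_solution num total → Spec_solution num total (solution num total)

-- ===== LEMMAS AND PROOFS =====

-- for positive num, A's two parity-split base formulas both equal floor((total - num(num-1)//2) / num)
theorem base_eq (num total : Int) (h : 0 < num) :
    (if PySem.Int.mod num 2 ≠ 0 then
        PySem.Int.floordiv total num - PySem.Int.floordiv (num - 1) 2
      else
        PySem.Int.floordiv (total - PySem.Int.floordiv num 2) num - (PySem.Int.floordiv num 2 - 1))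
    = PySem.Int.floordiv (total - PySem.Int.floordiv (num * (num - 1)) 2) num := by
  have h2 : (0:Int) < 2 := by norm_num
  rw [PySem.Int.mod_eq_emod_of_pos h2,
      PySem.Int.floordiv_eq_ediv_of_pos h2, PySem.Int.floordiv_eq_ediv_of_pos h2,
      PySem.Int.floordiv_eq_ediv_of_pos h2,
      PySem.Int.floordiv_eq_ediv_of_pos h, PySem.Int.floordiv_eq_ediv_of_pos h,
      PySem.Int.floordiv_eq_ediv_of_pos h]
  have hne : num ≠ 0 := by omega
  rcases Int.even_or_odd num with ⟨k, hk⟩ | ⟨k, hk⟩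
  · have hm : num % 2 = 0 := by omega
    simp only [hm, ne_eq, not_true_eq_false, if_false]
    have hhalf : num / 2 = k := by omega
    have hprod : num * (num - 1) / 2 = k * num - k := by
      have : num * (num - 1) = (k * num - k) * 2 := by rw [hk]; ring
      rw [this, Int.mul_ediv_cancel _ (by norm_num)]
    rw [hhalf, hprod]
    have e1 : total - (k * num - k) = (total + k) + (-k) * num := by ring
    have e2 : total - k = (total + k) + (-1) * num := by omega
    rw [e1, e2, Int.add_mul_ediv_right _ _ hne, Int.add_mul_ediv_right _ _ hne]
    ring
  · have hm : num % 2 = 1 := by omega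
    simp only [hm, ne_eq, one_ne_zero, not_false_eq_true, if_true]
    have hhalf : (num - 1) / 2 = k := by omega
    have hprod : num * (num - 1) / 2 = num * k := by
      have : num * (num - 1) = (num * k) * 2 := by rw [hk]; ring
      rw [this, Int.mul_ediv_cancel _ (by norm_num)]
    rw [hhalf, hprod]
    have e1 : total - num * k = total + (-k) * num := by ring
    rw [e1, Int.add_mul_ediv_right _ _ hne]
    ring

-- the binary search homes in on the unique b with num*b + tri ≤ total < num*(b+1) + tri
theorem bsearchB_eq (num total tri b : Int) (hnum : 0 < num)
    (hb1 : num * b + tri ≤ total) (hb2 : total < num * (b + 1) + tri) :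
    ∀ (n : ℕ) (lo hi : Int), (hi - lo).toNat ≤ n → lo ≤ b → b ≤ hi →
      bsearchB num total tri lo hi = b := by
  intro n
  induction n with
  | zero =>
    intro lo hi hle hlo hhi
    unfold bsearchB
    have hnl : ¬ lo < hi := by omega
    simp only [hnl, dite_false]
    omega
  | succ n ih =>
    intro lo hi hle hlo hhi
    unfold bsearchB
    by_cases hlt : lo < hi
    · simp only [hlt, dite_true]
      have hm : PySem.Int.floordiv (lo + hi + 1) 2 = (lo + hi + 1) / 2 :=
        PySem.Int.floordiv_eq_ediv_of_pos (by norm_num)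
      set mid := PySem.Int.floordiv (lo + hi + 1) 2 with hmid
      have hlo_mid : lo < mid := by omega
      have hmid_hi : mid ≤ hi := by omega
      by_cases hp : num * mid + tri ≤ total
      · simp only [hp, if_true]
        have hmb : mid ≤ b := by
          have : num * mid < num * (b + 1) := by omega
          have := lt_of_mul_lt_mul_left this (le_of_lt hnum)
          omega
        exact ih mid hi (by omega) hmb hhi
      · simp only [hp, if_false]
        have hbm : b < mid := by
          have : num * b < num * mid := by omega
          have := lt_of_mul_lt_mul_left this (le_of_lt hnum)
          omega
        exact ih lo (mid - 1) (by omega) hlo (by omega)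
    · simp only [hlt, dite_false]
      omega

-- shifting a zero-based range
theorem pyRange_shift (b n : Int) :
    PySem.List.pyRange b (b + n) 1 = (PySem.List.pyRange 0 n 1).map (fun i => b + i) := by
  rw [PySem.List.pyRange_one, PySem.List.pyRange_one]
  simp [List.map_map, Function.comp]

-- ===== VERDICT (by name: the statement is the Claim_ definition above) =====
theorem solution_spec : Claim_equal_solution := by
  intro num total _ hpre
  unfold Spec_solution solution solution_alt
  rcases Int.lt_or_le 0 num with h | h
  · have hg : ¬ num ≤ 0 := by omega
    simp only [hg, if_false]
    set tri := PySem.Int.floordiv (num * (num - 1)) 2 with htri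
    set bound := |total| + num * num with hbound
    -- the target of the search: b = floor((total - tri)/num)
    set b := PySem.Int.floordiv (total - tri) num with hb
    have hbe : b = (total - tri) / num := by
      rw [hb, PySem.Int.floordiv_eq_ediv_of_pos h]
    have hdm := Int.ediv_add_emod (total - tri) num
    have hm0 : 0 ≤ (total - tri) % num := Int.emod_nonneg _ (by omega)
    have hmlt : (total - tri) % num < num := Int.emod_lt_of_pos _ h
    have hb1 : num * b + tri ≤ total := by rw [hbe]; omega
    have hb2 : total < num * (b + 1) + tri := by
      rw [hbe]
      have : num * ((total - tri) / num + 1) = num * ((total - tri) / num) + num := by ring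
      omega
    -- tri is nonnegative and at most num*num
    have hev : Even (num * (num - 1)) := by
      have := Int.even_mul_succ_self (num - 1)
      have e : (num - 1) * (num - 1 + 1) = num * (num - 1) := by ring
      rwa [e] at this
    have htn : num * (num - 1) = 2 * (num * (num - 1) / 2) :=
      (Int.two_mul_ediv_two_of_even hev).symm
    have htrie : tri = num * (num - 1) / 2 := by
      rw [htri, PySem.Int.floordiv_eq_ediv_of_pos (show (0:Int) < 2 by norm_num)]
    have htri0 : 0 ≤ tri := by nlinarith [htrie, htn]
    have htriub : tri ≤ num * num := by nlinarith [htrie, htn]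
    -- the search bounds contain b
    have habs : -|total| ≤ total ∧ total ≤ |total| := ⟨neg_abs_le total, le_abs_self total⟩
    have hbub : b ≤ bound := by
      rcases Int.lt_or_le b 0 with hbneg | hbpos
      · omega
      · nlinarith
    have hblb : -bound ≤ b := by
      rcases Int.lt_or_le b 0 with hbneg | hbpos
      · nlinarith
      · omega
    have hrun : bsearchB num total tri (-bound) bound = b :=
      bsearchB_eq num total tri b h hb1 hb2 (bound - (-bound)).toNat (-bound) bound le_rfl hblb hbub
    rw [hrun, pyRange_shift, base_eq num total h]
  · -- num < 0: A maps over an empty range, B's guard returns []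
    have hg : num ≤ 0 := h
    simp only [hg, if_true]
    rw [PySem.List.pyRange_one_eq_nil (by omega)]
    simp
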